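-- pv_equiv track=rewrite | github.com/goldin2008/coding | dmsxl/interview.py | solution
-- ===== SOURCE A (Python) =====
-- def solution(queries):
--     trees = set()
--     longest_segments = []
--
--     for q in queries:
--         trees.add(q)
--         sorted_trees = sorted(trees)
--
--         # Finding the longest consecutive segment
--         max_len = 0
--         longest_segment = [sorted_trees[0], sorted_trees[0]]
--
--         start = sorted_trees[0]
--         for i in range(1, len(sorted_trees)):
--             if sorted_trees[i] != sorted_trees[i - 1] + 1:
--                 # New segment found
--                 segment_length = sorted_trees[i - 1] - start + 1
--                 if segment_length > max_len:
--                     max_len = segment_length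
--                     longest_segment = [start, sorted_trees[i - 1]]
--                 start = sorted_trees[i]
--
--         # Final check for the last segment
--         segment_length = sorted_trees[-1] - start + 1
--         if segment_length > max_len:
--             longest_segment = [start, sorted_trees[-1]]
--
--         longest_segments.append(longest_segment)
--
--     return longest_segments
-- ===== SOURCE B (Python) =====
-- def solution(queries):
--     seen = set()
--     cur = []            # sorted list of the distinct values, maintained by binary insertion
--     out = []
--     for q in queries:
--         if q in seen:
--             out.append(out[-1])   # set unchanged, answer unchanged
--             continue
--         seen.add(q)
--         lo, hi = 0, len(cur)
--         while lo < hi: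
--             mid = (lo + hi) // 2
--             if cur[mid] < q:
--                 lo = mid + 1
--             else:
--                 hi = mid
--         cur.insert(lo, q)
--         runs = []
--         for x in cur:
--             if runs and runs[-1][1] + 1 == x:
--                 runs[-1] = (runs[-1][0], x)
--             else:
--                 runs.append((x, x))
--         a, b = max(runs, key=lambda r: r[1] - r[0])
--         out.append([a, b])
--     return out
-- ===== Notes on version B (the rewrite author's own statement) =====
-- stated objective: alternative
-- what changed: B maintains the sorted distinct values incrementally by hand-rolled binary-search insertion (reusing the previous answer when a query is a duplicate) instead of re-sorting the set every round, and answers each round by materialising the explicit list of consecutive runs and taking max(runs, key=length) (first maximum = leftmost) instead of A's online max_len/start tracking scan.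
import Mathlib
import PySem

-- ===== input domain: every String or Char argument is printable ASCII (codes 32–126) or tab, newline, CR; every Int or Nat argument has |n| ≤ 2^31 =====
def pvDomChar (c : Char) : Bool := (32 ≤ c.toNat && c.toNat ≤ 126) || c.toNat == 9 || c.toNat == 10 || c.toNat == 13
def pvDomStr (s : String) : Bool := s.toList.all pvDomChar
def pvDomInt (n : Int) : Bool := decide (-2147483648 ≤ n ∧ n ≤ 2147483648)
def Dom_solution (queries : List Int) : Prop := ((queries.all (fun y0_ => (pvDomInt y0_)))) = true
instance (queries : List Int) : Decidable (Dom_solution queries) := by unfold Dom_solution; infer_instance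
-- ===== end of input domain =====

-- B re-implements the per-query answer by materialising the runs list and taking max(runs, key=length),
-- and maintains the sorted distinct values incrementally by binary insertion (reusing the previous answer
-- on duplicate queries) instead of re-sorting the set each round; objective: alternative (similar cost).

-- ===== PORT A =====
-- the index loop 'for i in range(1, len(sorted_trees))', threading (max_len, longest_segment, start);
-- prev is sorted_trees[i-1], rest the remaining sorted_trees[i:]
def solScanLoop (prev : Int) (rest : List Int) (maxLen : Int) (seg : Int × Int) (start : Int) : Int × Int :=
  match rest with
  | [] =>
    -- final check for the last segment
    if prev - start + 1 > maxLen then (start, prev) else seg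
  | x :: xs =>
    if x ≠ prev + 1 then
      if prev - start + 1 > maxLen then solScanLoop x xs (prev - start + 1) (start, prev) x
      else solScanLoop x xs maxLen seg x
    else solScanLoop x xs maxLen seg start

-- body of the outer 'for q in queries' loop, from 'sorted_trees = sorted(trees)' on
def solStep (sortedTrees : List Int) : List Int :=
  match sortedTrees with
  | [] => []   -- unreachable: trees always contains the q just added
  | s0 :: rest =>
    let r := solScanLoop s0 rest 0 (s0, s0) s0
    [r.1, r.2]

def solFold (st : PySem.Set Int × List (List Int)) (q : Int) : PySem.Set Int × List (List Int) :=
  let trees := PySem.Set.add st.1 q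
  (trees, st.2 ++ [solStep (PySem.List.sorted trees (fun x => x) false)])

def solution (queries : List Int) : List (List Int) :=
  (queries.foldl solFold (PySem.Set.empty, [])).2

-- ===== PORT B =====
-- the 'while lo < hi' binary-search loop of Source B
def altBisect (cur : List Int) (q lo hi : Int) : Int :=
  if h : lo < hi then
    let mid := PySem.Int.floordiv (lo + hi) 2
    if PySem.List.pyGetD cur mid 0 < q then altBisect cur q (mid + 1) hi
    else altBisect cur q lo mid
  else lo
termination_by (hi - lo).toNat
decreasing_by
  · have := PySem.Int.floordiv_two_mid_bounds (le_of_lt h); omega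
  · have h2 : PySem.Int.floordiv (lo + hi) 2 < hi :=
      (PySem.Int.floordiv_lt_iff_lt_mul (by omega)).2 (by omega)
    omega

-- the 'for x in cur' loop building runs (Source B appends and mutates the LAST run;
-- ported with the standard reversed accumulator, so this list is runs reversed)
def altRunsRev (cur : List Int) : List (Int × Int) :=
  cur.foldl (fun runs x =>
    match runs with
    | [] => [(x, x)]
    | (a, b) :: rs => if b + 1 = x then (a, x) :: rs else (x, x) :: (a, b) :: rs) []

-- 'a, b = max(runs, key=lambda r: r[1] - r[0]); out.append([a, b])'
def altStep (cur : List Int) : List Int :=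
  match PySem.List.max? ((altRunsRev cur).reverse) (fun r => r.2 - r.1) with
  | some r => [r.1, r.2]
  | none => []   -- unreachable: cur is nonempty when this runs

def altFold (st : PySem.Set Int × List Int × List (List Int)) (q : Int) : PySem.Set Int × List Int × List (List Int) :=
  let seen := st.1
  let cur := st.2.1
  let out := st.2.2
  if PySem.Set.contains seen q then
    (seen, cur, out ++ [PySem.List.pyGetD out (-1) []])   -- out.append(out[-1])
  else
    let seen' := PySem.Set.add seen q
    let lo := altBisect cur q 0 (PySem.List.len cur)
    let cur' := PySem.List.insert cur lo q
    (seen', cur', out ++ [altStep cur'])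

def solution_alt (queries : List Int) : List (List Int) :=
  (queries.foldl altFold (PySem.Set.empty, [], [])).2.2

-- ===== PRECONDITION & SPEC =====
def Spec_solution (queries : List Int) (out : List (List Int)) : Prop := out = solution_alt queries
instance (queries : List Int) (out : List (List Int)) : Decidable (Spec_solution queries out) := by unfold Spec_solution; infer_instance

-- ===== CLAIM (what is proved, stated in full; the proofs are below) =====
def Claim_equal_solution : Prop := ∀ (queries : List Int), Dom_solution queries → Spec_solution queries (solution queries)

-- ===== LEMMAS AND PROOFS =====

def runsAsc (start prev : Int) (rest : List Int) : List (Int × Int) :=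
  match rest with
  | [] => [(start, prev)]
  | x :: xs => if x = prev + 1 then runsAsc start x xs else (start, prev) :: runsAsc x x xs

def foldPick (m : Int) (seg : Int × Int) (rs : List (Int × Int)) : Int × Int :=
  match rs with
  | [] => seg
  | r :: rs => if r.2 - r.1 + 1 > m then foldPick (r.2 - r.1 + 1) r rs else foldPick m seg rs

theorem scanLoop_eq_foldPick (rest : List Int) :
    ∀ prev maxLen seg start,
      solScanLoop prev rest maxLen seg start = foldPick maxLen seg (runsAsc start prev rest) := by
  induction rest with
  | nil => intro prev maxLen seg start; simp [solScanLoop, runsAsc, foldPick]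
  | cons x xs ih =>
    intro prev maxLen seg start
    by_cases hx : x = prev + 1
    · simp [solScanLoop, runsAsc, hx, ih]
    · simp only [solScanLoop, runsAsc, hx, if_neg, if_true, ne_eq, not_false_iff]
      by_cases hm : prev - start + 1 > maxLen
      · simp [hm, foldPick, ih]
      · simp [hm, foldPick, ih]

theorem foldPick_eq_foldl (rs : List (Int × Int)) :
    ∀ seg : Int × Int,
      foldPick (seg.2 - seg.1 + 1) seg rs
        = rs.foldl (fun b r => if b.2 - b.1 < r.2 - r.1 then r else b) seg := by
  induction rs with
  | nil => intro seg; rfl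
  | cons r rs ih =>
    intro seg
    by_cases h : seg.2 - seg.1 < r.2 - r.1
    · simp only [foldPick, List.foldl, if_pos h, gt_iff_lt, if_pos (by omega : seg.2 - seg.1 + 1 < r.2 - r.1 + 1)]
      exact ih r
    · simp only [foldPick, List.foldl, if_neg h, gt_iff_lt, if_neg (by omega : ¬ seg.2 - seg.1 + 1 < r.2 - r.1 + 1)]
      exact ih seg

theorem runsRev_eq (rest : List Int) :
    ∀ (a b : Int) (acc : List (Int × Int)),
      List.foldl (fun runs x =>
        match runs with
        | [] => [(x, x)]
        | (a, b) :: rs => if b + 1 = x then (a, x) :: rs else (x, x) :: (a, b) :: rs)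
        ((a, b) :: acc) rest = (runsAsc a b rest).reverse ++ acc := by
  induction rest with
  | nil => intro a b acc; simp [runsAsc]
  | cons x xs ih =>
    intro a b acc
    by_cases hx : x = b + 1
    · simp [runsAsc, hx, List.foldl, ih]
    · have hx' : ¬ b + 1 = x := fun h => hx h.symm
      simp [runsAsc, hx, hx', List.foldl, ih]

theorem runsAsc_head (rest : List Int) :
    ∀ prev start, start ≤ prev →
      ∃ p rs, runsAsc start prev rest = (start, p) :: rs ∧ start ≤ p := by
  induction rest with
  | nil => intro prev start h; exact ⟨prev, [], rfl, h⟩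
  | cons x xs ih =>
    intro prev start h
    by_cases hx : x = prev + 1
    · subst hx
      obtain ⟨p, rs, heq, hle⟩ := ih (prev + 1) start (by omega)
      exact ⟨p, rs, by simp [runsAsc, heq], hle⟩
    · exact ⟨prev, runsAsc x x xs, by simp [runsAsc, hx], h⟩

theorem max?_cons_cons {α κ : Type} [LinearOrder κ] (a b : α) (rs : List α) (key : α → κ) :
    PySem.List.max? (a :: b :: rs) key
      = PySem.List.max? ((if key a < key b then b else a) :: rs) key := by
  simp only [PySem.List.max?, List.foldl_cons]
  congr 1
  by_cases h : key a < key b <;> simp [h]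

theorem max?_foldl {α κ : Type} [LinearOrder κ] (rs : List α) :
    ∀ (seg : α) (key : α → κ),
      PySem.List.max? (seg :: rs) key
        = some (rs.foldl (fun b r => if key b < key r then r else b) seg) := by
  induction rs with
  | nil => intro seg key; rfl
  | cons r rs ih =>
    intro seg key
    rw [max?_cons_cons, ih]
    by_cases h : key seg < key r <;> simp [h]

theorem step_eq (s : List Int) : solStep s = altStep s := by
  match s with
  | [] => rfl
  | s0 :: rest =>
    obtain ⟨p, rs, heq, hle⟩ := runsAsc_head rest s0 s0 le_rfl
    have h1 : altRunsRev (s0 :: rest) = (runsAsc s0 s0 rest).reverse := by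
      have := runsRev_eq rest s0 s0 []
      simpa [altRunsRev, List.foldl] using this
    have h2 : solScanLoop s0 rest 0 (s0, s0) s0
        = List.foldl (fun b r => if b.2 - b.1 < r.2 - r.1 then r else b) (s0, p) rs := by
      rw [scanLoop_eq_foldPick, heq]
      have : foldPick 0 (s0, s0) ((s0, p) :: rs) = foldPick (p - s0 + 1) (s0, p) rs := by
        simp [foldPick, show p - s0 + 1 > 0 by omega]
      rw [this]
      have := foldPick_eq_foldl rs (s0, p)
      simpa using this
    have h3 : PySem.List.max? ((altRunsRev (s0 :: rest)).reverse) (fun r : Int × Int => r.2 - r.1)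
        = some (List.foldl (fun b r => if b.2 - b.1 < r.2 - r.1 then r else b) (s0, p) rs) := by
      rw [h1, List.reverse_reverse, heq, max?_foldl]
    simp [solStep, altStep, h2, h3]

theorem bisect_spec (cur : List Int) (q : Int) (hp : cur.Pairwise (· < ·)) :
    ∀ lo hi, 0 ≤ lo → lo ≤ hi → hi ≤ (cur.length : Int) →
      (∀ i : Nat, (i : Int) < lo → ∀ h : i < cur.length, cur[i] < q) →
      (∀ i : Nat, hi ≤ (i : Int) → ∀ h : i < cur.length, ¬ cur[i] < q) →
      0 ≤ altBisect cur q lo hi ∧ altBisect cur q lo hi ≤ (cur.length : Int) ∧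
      (∀ i : Nat, (i : Int) < altBisect cur q lo hi → ∀ h : i < cur.length, cur[i] < q) ∧
      (∀ i : Nat, altBisect cur q lo hi ≤ (i : Int) → ∀ h : i < cur.length, ¬ cur[i] < q) := by
  have hmono := List.pairwise_iff_getElem.1 hp
  intro lo hi
  induction lo, hi using altBisect.induct cur q with
  | case1 lo hi h mid hget ih =>
    intro h0 hlh hhl hlow hhigh
    have hmid := PySem.Int.floordiv_two_mid_bounds (le_of_lt h)
    have hmlt : mid < hi := (PySem.Int.floordiv_lt_iff_lt_mul (by omega)).2 (by omega)
    have hget' : PySem.List.pyGetD cur (PySem.Int.floordiv (lo + hi) 2) 0 < q := hget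
    rw [show altBisect cur q lo hi = altBisect cur q (mid + 1) hi by
      rw [altBisect, dif_pos h]
      show (if PySem.List.pyGetD cur (PySem.Int.floordiv (lo + hi) 2) 0 < q then
          altBisect cur q (PySem.Int.floordiv (lo + hi) 2 + 1) hi
        else altBisect cur q lo (PySem.Int.floordiv (lo + hi) 2)) = _
      rw [if_pos hget']]
    apply ih (by omega) (by omega) hhl ?_ hhigh
    intro i hilt hih
    have hmidn : mid.toNat < cur.length := by omega
    have hgetm : cur[mid.toNat] < q := by
      have := PySem.List.pyGetD_eq_getElem (xs := cur) (i := mid) (d := 0) (by omega) (by omega)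
      rwa [this] at hget
    rcases lt_trichotomy (i : Int) mid with hc | hc | hc
    · exact lt_trans (hmono i mid.toNat hih hmidn (by omega)) hgetm
    · have : i = mid.toNat := by omega
      subst this; exact hgetm
    · omega
  | case2 lo hi h mid hget ih =>
    intro h0 hlh hhl hlow hhigh
    have hmid := PySem.Int.floordiv_two_mid_bounds (le_of_lt h)
    have hmlt : mid < hi := (PySem.Int.floordiv_lt_iff_lt_mul (by omega)).2 (by omega)
    have hget' : ¬ PySem.List.pyGetD cur (PySem.Int.floordiv (lo + hi) 2) 0 < q := hget
    rw [show altBisect cur q lo hi = altBisect cur q lo mid by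
      rw [altBisect, dif_pos h]
      show (if PySem.List.pyGetD cur (PySem.Int.floordiv (lo + hi) 2) 0 < q then
          altBisect cur q (PySem.Int.floordiv (lo + hi) 2 + 1) hi
        else altBisect cur q lo (PySem.Int.floordiv (lo + hi) 2)) = _
      rw [if_neg hget']]
    apply ih h0 (by omega) (by omega) hlow ?_
    intro i hile hih
    have hmidn : mid.toNat < cur.length := by omega
    have hgetm : ¬ cur[mid.toNat] < q := by
      have := PySem.List.pyGetD_eq_getElem (xs := cur) (i := mid) (d := 0) (by omega) (by omega)
      rwa [this] at hget
    rcases lt_trichotomy (mid : Int) i with hc | hc | hc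
    · intro hlt
      exact hgetm (lt_trans (hmono mid.toNat i hmidn hih (by omega)) hlt)
    · have : i = mid.toNat := by omega
      subst this; exact hgetm
    · omega
  | case3 lo hi h =>
    intro h0 hlh hhl hlow hhigh
    rw [show altBisect cur q lo hi = lo by rw [altBisect]; simp [h]]
    refine ⟨h0, by omega, hlow, ?_⟩
    intro i hile hih
    exact hhigh i (by omega) hih

theorem take_eq_filter (cur : List Int) (P : Int → Prop) [DecidablePred P] :
    ∀ p : Nat, p ≤ cur.length →
      (∀ i : Nat, ∀ h : i < cur.length, i < p → P cur[i]) →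
      (∀ i : Nat, ∀ h : i < cur.length, p ≤ i → ¬ P cur[i]) →
      cur.take p = cur.filter (fun x => decide (P x)) ∧
      cur.drop p = cur.filter (fun x => ! decide (P x)) := by
  induction cur with
  | nil => intro p _ _ _; simp
  | cons x xs ih =>
    intro p hp hlow hhigh
    match p with
    | 0 =>
      have hall : ∀ y ∈ x :: xs, ¬ P y := by
        intro y hy
        obtain ⟨i, hi, rfl⟩ := List.getElem_of_mem hy
        exact hhigh i hi (Nat.zero_le _)
      constructor
      · rw [List.take_zero]
        symm
        rw [List.filter_eq_nil_iff]
        intro y hy; simpa using hall y hy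
      · rw [List.drop_zero]
        symm
        rw [List.filter_eq_self]
        intro y hy; simpa using hall y hy
    | p + 1 =>
      have hx : P x := hlow 0 (by simp) (by omega)
      obtain ⟨h1, h2⟩ := ih p (by simpa using hp)
        (fun i h hip => hlow (i + 1) (by simpa using h) (by omega))
        (fun i h hip => hhigh (i + 1) (by simpa using h) (by omega))
      constructor
      · simp [List.take_succ_cons, hx, h1]
      · simp [List.drop_succ_cons, hx, h2]

theorem insert_sorted (T : PySem.Set Int) (q : Int) (hn : T.Nodup) (hq : q ∉ T) :
    PySem.List.insert (PySem.List.sorted T (fun x => x) false)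
        (altBisect (PySem.List.sorted T (fun x => x) false) q 0
          (PySem.List.len (PySem.List.sorted T (fun x => x) false))) q
      = PySem.List.sorted (T ++ [q]) (fun x => x) false := by
  set cur := PySem.List.sorted T (fun x => x) false with hcur
  have hperm : cur.Perm T := PySem.List.sorted_perm T _ false
  have hnd : cur.Nodup := hperm.nodup_iff.2 hn
  have hle : cur.Pairwise (· ≤ ·) := by
    simpa using PySem.List.sorted_pairwise T (fun x => x)
  have hp : cur.Pairwise (· < ·) := by
    refine (hle.and hnd).imp ?_
    rintro a b ⟨h1, h2⟩; exact lt_of_le_of_ne h1 h2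
  have hqc : q ∉ cur := fun hmem => hq (hperm.mem_iff.1 hmem)
  have hlen : PySem.List.len cur = (cur.length : Int) := by simp [PySem.List.len_eq]
  rw [hlen]
  obtain ⟨hr0, hrle, hrlow, hrhigh⟩ :=
    bisect_spec cur q hp 0 (cur.length : Int) le_rfl (by positivity) le_rfl
      (fun i hi h => absurd hi (by omega))
      (fun i hi h => absurd hi (by omega))
  set r := altBisect cur q 0 (cur.length : Int) with hrdef
  have hrn : r = ((r.toNat : Nat) : Int) := (Int.toNat_of_nonneg hr0).symm
  set p := r.toNat with hpdef
  have hple : p ≤ cur.length := by omega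
  obtain ⟨htake, hdrop⟩ := take_eq_filter cur (fun x => x < q) p hple
    (fun i h hip => hrlow i (by omega) h)
    (fun i h hip => hrhigh i (by omega) h)
  rw [hrn, PySem.List.insert_natCast cur p q hple]
  symm
  apply PySem.List.sorted_eq_of_perm_of_pairwise_lt
  · have h1 : (cur.take p ++ q :: cur.drop p).Perm (q :: cur) := by
      have h := List.perm_middle (a := q) (l₁ := cur.take p) (l₂ := cur.drop p)
      rwa [List.take_append_drop] at h
    have h2 : (q :: T).Perm (T ++ [q]) := by
      simpa using (List.perm_middle (a := q) (l₁ := T) (l₂ := ([] : List Int))).symm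
    exact h1.trans ((hperm.cons q).trans h2)
  · show (cur.take p ++ q :: cur.drop p).Pairwise (fun a b => a < b)
    rw [htake, hdrop, List.pairwise_append]
    refine ⟨hp.filter _, ?_, ?_⟩
    · rw [List.pairwise_cons]
      constructor
      · intro y hy
        rw [List.mem_filter] at hy
        obtain ⟨hyc, hyq⟩ := hy
        simp only [Bool.not_eq_true', decide_eq_false_iff_not, not_lt] at hyq
        exact lt_of_le_of_ne hyq (fun e => hqc (e ▸ hyc))
      · exact hp.filter _
    · intro x hx y hy
      rw [List.mem_filter] at hx
      have hxq : x < q := by simpa using hx.2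
      rcases List.mem_cons.1 hy with rfl | hy'
      · exact hxq
      · rw [List.mem_filter] at hy'
        have : ¬ y < q := by simpa using hy'.2
        omega

theorem outer (qs : List Int) :
    ∀ (T : PySem.Set Int) (cur : List Int) (out : List (List Int)),
      T.Nodup →
      cur = PySem.List.sorted T (fun x => x) false →
      (out = [] ↔ T = []) →
      (out ≠ [] → PySem.List.pyGetD out (-1) [] = solStep cur) →
      (List.foldl solFold (T, out) qs).2 = (List.foldl altFold (T, cur, out) qs).2.2 := by
  induction qs with
  | nil => intro T cur out _ _ _ _; rfl
  | cons q qs ih =>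
    intro T cur out hn hcur hiff hlast
    simp only [List.foldl_cons]
    by_cases hq : q ∈ T
    · have hc : PySem.Set.contains T q = true := (PySem.Set.contains_iff T q).2 hq
      have hTne : T ≠ [] := by rintro rfl; exact (List.not_mem_nil).elim hq
      have houtne : out ≠ [] := fun h => hTne (hiff.1 h)
      have hstepA : PySem.Set.add T q = T := PySem.Set.add_of_mem hq
      have hA : solFold (T, out) q = (T, out ++ [solStep cur]) := by
        simp [solFold, hstepA, ← hcur]
      have hB : altFold (T, cur, out) q = (T, cur, out ++ [solStep cur]) := by
        simp only [altFold]
        rw [if_pos hc, hlast houtne]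
      rw [hA, hB]
      exact ih T cur (out ++ [solStep cur]) hn hcur
        (by simp [hTne])
        (fun _ => by rw [PySem.List.pyGetD_neg_one_append_singleton])
    · have hc : PySem.Set.contains T q = false := by
        rw [← Bool.not_eq_true]; intro h; exact hq ((PySem.Set.contains_iff T q).1 h)
      have hstepA : PySem.Set.add T q = T ++ [q] := PySem.Set.add_of_not_mem hq
      have hcur' : PySem.List.insert cur (altBisect cur q 0 (PySem.List.len cur)) q
          = PySem.List.sorted (T ++ [q]) (fun x => x) false := by
        rw [hcur]; exact insert_sorted T q hn hq
      have hA : solFold (T, out) q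
          = (T ++ [q], out ++ [solStep (PySem.List.sorted (T ++ [q]) (fun x => x) false)]) := by
        simp [solFold, hstepA]
      have hB : altFold (T, cur, out) q
          = (T ++ [q], PySem.List.sorted (T ++ [q]) (fun x => x) false,
             out ++ [solStep (PySem.List.sorted (T ++ [q]) (fun x => x) false)]) := by
        simp only [altFold]
        rw [if_neg (fun h => hq ((PySem.Set.contains_iff T q).1 h)), hstepA, hcur', ← step_eq]
      have hn' : (T ++ [q]).Nodup := by
        rw [← hstepA]; exact PySem.Set.nodup_add T q hn
      rw [hA, hB]
      exact ih (T ++ [q]) _ _ hn' rfl (by simp)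
        (fun _ => by rw [PySem.List.pyGetD_neg_one_append_singleton])

-- ===== VERDICT (by name: the statement is the Claim_ definition above) =====
theorem solution_spec : Claim_equal_solution := by
  intro queries _
  unfold Spec_solution solution solution_alt
  exact outer queries PySem.Set.empty [] [] List.nodup_nil rfl (by simp [PySem.Set.empty]) (by simp)
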